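-- pv_equiv track=rewrite | github.com/NEXTAltair/Lorayougazouwoiroirosurusukuriputo | cleanup_txt.py | tags_to_dict
-- ===== SOURCE A (Python) =====
-- def tags_to_dict(tags):
--     """タグを辞書に変換する"""
--     # タグをカンマで分割し、不要な空白を取り除く
--     tag_list = [tag.strip() for tag in tags.split(",") if tag.strip()]
--
--     # 重複を避けるためのセット
--     seen_tags = set()
--     tags_dict = {}
--     for i, tag in enumerate(tag_list):
--         if tag not in seen_tags:
--             seen_tags.add(tag)
--             tags_dict[i] = tag
--     return tags_dict
-- ===== SOURCE B (Python) =====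
-- def tags_to_dict(tags):
--     """タグを辞書に変換する"""
--     # タグをカンマで分割し、不要な空白を取り除く
--     tag_list = [tag.strip() for tag in tags.split(",") if tag.strip()]
--
--     # グループ化: 各タグの出現位置のリストを作る (tag -> [indices])
--     positions = {}
--     for i, tag in enumerate(tag_list):
--         positions.setdefault(tag, []).append(i)
--
--     # 各タグの最初の出現位置をキーにする
--     return {ix[0]: tag for tag, ix in positions.items()}
-- ===== Notes on version B (the rewrite author's own statement) =====
-- stated objective: alternative
-- what changed: Replaces the seen-set + index-keyed dict loop by a group-by pass building a tag->list-of-indices multimap (dict.setdefault) and a second pass that keys each tag by the head of its index group; dedup falls out of the grouping, there is no membership test at all.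
import Mathlib
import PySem

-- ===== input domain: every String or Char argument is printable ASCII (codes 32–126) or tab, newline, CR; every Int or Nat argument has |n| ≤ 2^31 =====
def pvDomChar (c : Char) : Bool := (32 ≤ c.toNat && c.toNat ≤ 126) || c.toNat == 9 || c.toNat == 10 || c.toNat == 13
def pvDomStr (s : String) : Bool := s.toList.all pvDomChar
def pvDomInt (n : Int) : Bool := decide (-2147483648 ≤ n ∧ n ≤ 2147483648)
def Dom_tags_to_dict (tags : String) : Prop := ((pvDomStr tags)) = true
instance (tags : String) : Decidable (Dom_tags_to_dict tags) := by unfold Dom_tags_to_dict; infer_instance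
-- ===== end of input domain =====

-- B replaces the seen-set + index-keyed loop by a group-by pass (tag -> list of indices,
-- dict.setdefault) followed by a pass keying each tag by the head of its index group
-- (alternative algorithm: dedup falls out of grouping; no membership test).


-- ===== PORT A =====
-- tag_list = [tag.strip() for tag in tags.split(",") if tag.strip()]
-- (split? is exact for the nonempty separator ","; getD [] is never taken)
def pvTagList (tags : String) : List String :=
  (((PySem.Str.split? tags ",").getD []).filter (fun t => PySem.Str.strip t ≠ "")).map PySem.Str.strip

-- seen_tags = set(); tags_dict = {}; for i, tag in enumerate(tag_list): …
def tags_to_dict (tags : String) : List (Int × String) :=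
  let tag_list := pvTagList tags
  ((PySem.List.enumerate tag_list 0).foldl
    (fun (st : PySem.Set String × PySem.Dict Int String) p =>
      if PySem.Set.contains st.1 p.2 then st
      else (PySem.Set.add st.1 p.2, st.2.insert p.1 p.2))
    (PySem.Set.empty, PySem.Dict.empty)).2.items

-- ===== PORT B =====
-- positions = {}; for i, tag in enumerate(tag_list): positions.setdefault(tag, []).append(i)
-- (setdefault(tag, []).append(i) nets to positions[tag] = positions.get(tag, []) + [i],
--  in place if present, appended if new — exactly Dict.modify)
-- return {ix[0]: tag for tag, ix in positions.items()}
-- (ix is nonempty by construction, so ix[0] is its head; headI is exact here)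
def tags_to_dict_alt (tags : String) : List (Int × String) :=
  let tag_list := pvTagList tags
  let positions := (PySem.List.enumerate tag_list 0).foldl
      (fun (d : PySem.Dict String (List Int)) p => d.modify p.2 [] (· ++ [p.1]))
      PySem.Dict.empty
  (positions.items.foldl
    (fun (d : PySem.Dict Int String) q => d.insert q.2.headI q.1)
    PySem.Dict.empty).items

-- ===== PRECONDITION & SPEC =====
def Spec_tags_to_dict (tags : String) (out : List (Int × String)) : Prop := out = tags_to_dict_alt tags
instance (tags : String) (out : List (Int × String)) : Decidable (Spec_tags_to_dict tags out) := by unfold Spec_tags_to_dict; infer_instance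

-- ===== CLAIM (what is proved, stated in full; the proofs are below) =====
def Claim_equal_tags_to_dict : Prop := ∀ (tags : String), Dom_tags_to_dict tags → Spec_tags_to_dict tags (tags_to_dict tags)

-- ===== LEMMAS AND PROOFS =====

-- Canonical value both programs compute: each distinct tag, in first-occurrence order,
-- paired with the index of its first occurrence.
def pvCanon (L : List String) : List (Int × String) :=
  (PySem.Set.ofList L).map (fun t => ((L.idxOf t : Int), t))

-- A-side loop invariant: after the first k elements, seen is the set of the first k
-- tags and the dict holds the canonical pairs for the distinct tags of the prefix.
theorem pv_a_loop (L l : List String) (k : Nat)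
    (hL : L.take k ++ l = L)
    (d : PySem.Dict Int String)
    (hd : d.items = (PySem.Set.ofList (L.take k)).map (fun t => ((L.idxOf t : Int), t))) :
    ((PySem.List.enumerate l (k : Int)).foldl
      (fun (st : PySem.Set String × PySem.Dict Int String) p =>
        if PySem.Set.contains st.1 p.2 then st
        else (PySem.Set.add st.1 p.2, st.2.insert p.1 p.2))
      (PySem.Set.ofList (L.take k), d)).2.items = pvCanon L := by
  induction l generalizing k d with
  | nil =>
    have hkL : L.take k = L := by simpa using hL
    simp only [PySem.List.enumerate_nil, List.foldl_nil]
    rw [hd, hkL]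
    rfl
  | cons x l ih =>
    have hk : (L.take k).length = k := by
      have h := congrArg List.length hL
      have h2 : (L.take k).length = min k L.length := List.length_take
      simp at h; omega
    have htake : L.take (k+1) = L.take k ++ [x] := by
      conv_lhs => rw [← hL]
      rw [show k + 1 = (L.take k).length + 1 by omega, List.take_append]
      simp
    have hL' : L.take (k+1) ++ l = L := by rw [htake]; simpa using hL
    have hlt : ∀ t ∈ L.take k, L.idxOf t < k := by
      intro t ht
      have he : L.idxOf t = (L.take k).idxOf t := by
        conv_lhs => rw [← hL]
        exact List.idxOf_append_of_mem ht
      rw [he]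
      have := List.idxOf_lt_length_of_mem ht
      omega
    rw [PySem.List.enumerate_cons]
    simp only [List.foldl_cons]
    by_cases hx : x ∈ L.take k
    · have hc : PySem.Set.contains (PySem.Set.ofList (L.take k)) x = true := by
        simp [PySem.Set.mem_ofList, hx]
      have hsame : PySem.Set.ofList (L.take (k+1)) = PySem.Set.ofList (L.take k) := by
        rw [htake, PySem.Set.ofList_append_singleton,
          PySem.Set.add_of_mem (by rw [PySem.Set.mem_ofList]; exact hx)]
      have ihk := ih (k+1) hL' d (by rw [hd, hsame])
      rw [hsame] at ihk
      push_cast at ihk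
      rw [if_pos hc]
      exact ihk
    · have hc : PySem.Set.contains (PySem.Set.ofList (L.take k)) x = false := by
        simp [PySem.Set.mem_ofList, hx]
      have hidx : L.idxOf x = k := by
        conv_lhs => rw [← hL]
        rw [List.idxOf_append_of_notMem hx, List.idxOf_cons_self, hk]
        omega
      have hdk : d.contains ((k : Nat) : Int) = false := by
        have hknotin : ((k : Nat) : Int) ∉ d.keys := by
          simp only [PySem.Dict.keys, hd, List.map_map]
          intro hmem
          obtain ⟨t, ht, hteq⟩ := List.mem_map.mp hmem
          have htk : t ∈ L.take k := (PySem.Set.mem_ofList _ _).mp ht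
          have := hlt t htk
          simp only [Function.comp_def] at hteq
          omega
        rw [PySem.Dict.contains_eq_decide_mem_keys]
        simpa using hknotin
      have hseen : PySem.Set.add (PySem.Set.ofList (L.take k)) x
          = PySem.Set.ofList (L.take (k+1)) := by
        rw [htake, PySem.Set.ofList_append_singleton]
      have hnew : (d.insert ((k : Nat) : Int) x).items
          = (PySem.Set.ofList (L.take (k+1))).map (fun t => ((L.idxOf t : Int), t)) := by
        rw [PySem.Dict.items_insert_of_not_contains _ _ hdk, hd, htake,
          PySem.Set.ofList_append_singleton,
          PySem.Set.add_of_not_mem (by rw [PySem.Set.mem_ofList]; exact hx),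
          List.map_append]
        simp [hidx]
      have ihk := ih (k+1) hL' (d.insert ((k : Nat) : Int) x) hnew
      push_cast at ihk
      rw [if_neg (by simp [PySem.Set.mem_ofList, hx]), hseen]
      exact ihk

theorem pv_a_eq_canon (L : List String) :
    ((PySem.List.enumerate L 0).foldl
      (fun (st : PySem.Set String × PySem.Dict Int String) p =>
        if PySem.Set.contains st.1 p.2 then st
        else (PySem.Set.add st.1 p.2, st.2.insert p.1 p.2))
      (PySem.Set.empty, PySem.Dict.empty)).2.items = pvCanon L := by
  have h := pv_a_loop L L 0 (by simp) PySem.Dict.empty rfl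
  simpa using h

theorem pv_head_filter (L : List String) (t : String) (s : Int) (h : t ∈ L) :
    ((((PySem.List.enumerate L s).filter (fun p => p.2 == t)).map (·.1))).headI
      = s + (L.idxOf t : Int) := by
  induction L generalizing s with
  | nil => cases h
  | cons x l ih =>
    rw [PySem.List.enumerate_cons]
    by_cases hx : x = t
    · subst hx
      simp [List.idxOf_cons_self]
    · have ht : t ∈ l := by
        rcases List.mem_cons.mp h with h1 | h1
        · exact absurd h1.symm hx
        · exact h1
      rw [List.filter_cons_of_neg (by simp [hx])]
      rw [ih (s + 1) ht, List.idxOf_cons_ne _ (by simpa using hx)]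
      push_cast
      ring

theorem pv_b_eq_canon (L : List String) :
    (let positions := (PySem.List.enumerate L 0).foldl
        (fun (d : PySem.Dict String (List Int)) p => d.modify p.2 [] (· ++ [p.1]))
        PySem.Dict.empty
     (positions.items.foldl
       (fun (d : PySem.Dict Int String) q => d.insert q.2.headI q.1)
       PySem.Dict.empty).items) = pvCanon L := by
  simp only []
  set E := PySem.List.enumerate L 0 with hE
  set positions := E.foldl
      (fun (d : PySem.Dict String (List Int)) p => d.modify p.2 [] (· ++ [p.1]))
      PySem.Dict.empty with hpos
  have hnodup : positions.keys.Nodup := by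
    rw [hpos]
    exact PySem.Dict.nodup_keys_foldl_modify_key E (fun p => p.2) []
      (fun d p => (· ++ [p.1])) PySem.Dict.empty (by simp)
  have hkeys : positions.keys = PySem.Set.ofList L := by
    rw [hpos, PySem.Dict.keys_foldl_modify_key]
    simp only [PySem.Dict.keys_empty, PySem.Set.update_nil_left, hE]
    rw [show (List.map (fun p => p.2) (PySem.List.enumerate L 0)) = L from
      PySem.List.map_snd_enumerate L 0]
  have hgetD : ∀ t, positions.getD t [] = (E.filter (fun p => p.2 == t)).map (·.1) := by
    intro t
    have hswap : positions = (E.map Prod.swap).foldl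
        (fun (d : PySem.Dict String (List Int)) q => d.modify q.1 [] (· ++ [q.2]))
        PySem.Dict.empty := by
      rw [hpos, List.foldl_map]
      rfl
    rw [hswap, PySem.Dict.getD_foldl_modify_append]
    rw [PySem.Dict.getD_empty]
    rw [List.filter_map]
    simp [List.map_map, Function.comp_def, Prod.swap]
  have hitems : positions.items = (PySem.Set.ofList L).map
      (fun t => (t, (E.filter (fun p => p.2 == t)).map (·.1))) := by
    rw [PySem.Dict.items_eq_map_keys positions hnodup [], hkeys]
    exact List.map_congr_left (fun t _ => by rw [hgetD])
  have hhead : ∀ t ∈ PySem.Set.ofList L,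
      (((E.filter (fun p => p.2 == t)).map (·.1))).headI = (L.idxOf t : Int) := by
    intro t ht
    have htL : t ∈ L := (PySem.Set.mem_ofList L t).mp ht
    have := pv_head_filter L t 0 htL
    rw [hE]; omega
  have hfresh : ∀ a ∈ positions.items,
      (PySem.Dict.empty : PySem.Dict Int String).contains a.2.headI = false := by
    intro a _; exact PySem.Dict.contains_empty _
  have hmapk : positions.items.map (fun (q : String × List Int) => q.2.headI)
      = (PySem.Set.ofList L).map (fun t => (L.idxOf t : Int)) := by
    rw [hitems, List.map_map]
    exact List.map_congr_left (fun t ht => by simpa using hhead t ht)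
  have hnodupk : (positions.items.map (fun (q : String × List Int) => q.2.headI)).Nodup := by
    rw [hmapk]
    refine (List.nodup_map_iff_inj_on (PySem.Set.nodup_ofList L)).mpr ?_
    intro a ha b hb hab
    have haL : a ∈ L := (PySem.Set.mem_ofList L a).mp ha
    have hbL : b ∈ L := (PySem.Set.mem_ofList L b).mp hb
    have hn : L.idxOf a = L.idxOf b := by exact_mod_cast hab
    calc a = L[L.idxOf a]'(List.idxOf_lt_length_of_mem haL) :=
            (List.getElem_idxOf (List.idxOf_lt_length_of_mem haL)).symm
      _ = L[L.idxOf b]'(List.idxOf_lt_length_of_mem hbL) := by simp_rw [hn]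
      _ = b := List.getElem_idxOf (List.idxOf_lt_length_of_mem hbL)
  rw [PySem.Dict.items_foldl_insert_fresh positions.items
      (fun (q : String × List Int) => q.2.headI) (fun q => q.1)
      PySem.Dict.empty hfresh hnodupk]
  rw [hitems, List.map_map,
    show (PySem.Dict.empty : PySem.Dict Int String).items = ([] : List (Int × String)) from rfl,
    List.nil_append]
  unfold pvCanon
  exact List.map_congr_left (fun t ht => by simp [hhead t ht])

-- ===== VERDICT (by name: the statement is the Claim_ definition above) =====
theorem tags_to_dict_spec : Claim_equal_tags_to_dict := by
  intro tags _
  unfold Spec_tags_to_dict tags_to_dict tags_to_dict_alt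
  rw [pv_a_eq_canon, pv_b_eq_canon]
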